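-- pv_equiv track=rewrite | github.com/Zelaron/Sprecher-Network | benchmarks/benchmark_motif_chirp.py | choose_kan_knots_to_match
-- ===== SOURCE A (Python) =====
-- from typing import List, Tuple, Optional
--
-- def kan_param_count(input_dim: int, widths: List[int], num_knots: int) -> int:
--     dims = [int(input_dim)] + [int(w) for w in widths] + [1]
--     edges = sum(dims[i] * dims[i + 1] for i in range(len(dims) - 1))
--     biases = sum(dims[i + 1] for i in range(len(dims) - 1))
--     return int(edges * int(num_knots) + biases)
--
-- def choose_kan_knots_to_match(
--     target_params: int,
--     input_dim: int,
--     widths: List[int],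
--     min_knots: int = 4,
--     max_knots: int = 64,
--     min_params: int = 2000,
-- ) -> Tuple[int, int]:
--     best_k: Optional[int] = None
--     best_params: Optional[int] = None
--     best_diff: Optional[int] = None
--
--     for k in range(int(min_knots), int(max_knots) + 1):
--         p = kan_param_count(input_dim=input_dim, widths=widths, num_knots=k)
--         if p < int(min_params):
--             continue
--         diff = abs(int(p) - int(target_params))
--         if best_k is None or diff < best_diff:
--             best_k, best_params, best_diff = k, p, diff
--
--     if best_k is None:
--         raise ValueError(
--             f"Could not find KAN knots in [{min_knots},{max_knots}] yielding >= {min_params} params "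
--             f"for widths={widths}, input_dim={input_dim}."
--         )
--     return int(best_k), int(best_params)
-- ===== SOURCE B (Python) =====
-- from typing import List, Tuple
--
--
-- def choose_kan_knots_to_match(
--     target_params: int,
--     input_dim: int,
--     widths: List[int],
--     min_knots: int = 4,
--     max_knots: int = 64,
--     min_params: int = 2000,
-- ) -> Tuple[int, int]:
--     # param count is linear in k: p(k) = edges * k + biases; compute the
--     # coefficients once and pick the admissible k closest to the target in O(1).
--     dims = [int(input_dim)] + [int(w) for w in widths] + [1]
--     edges = sum(x * y for x, y in zip(dims, dims[1:]))
--     biases = sum(dims[1:])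
--     t = int(target_params)
--     P = int(min_params)
--     lo = int(min_knots)
--     hi = int(max_knots)
--     # restrict [lo, hi] to the k with p(k) >= P
--     if edges > 0:
--         lo = max(lo, -((biases - P) // edges))  # ceil((P - biases) / edges)
--     elif edges < 0:
--         hi = min(hi, (P - biases) // edges)
--     elif biases < P:  # edges == 0: p is constant
--         lo = hi + 1  # empty window
--     if lo > hi:
--         raise ValueError(
--             f"Could not find KAN knots in [{min_knots},{max_knots}] yielding >= {min_params} params "
--             f"for widths={widths}, input_dim={input_dim}."
--         )
--     if edges == 0:
--         k = lo
--     else: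
--         # unclamped minimiser of |edges*k + biases - t| lies in {q, q+1};
--         # ties go to the smaller k, then clamp into the window
--         q = (t - biases) // edges
--         d0 = abs(edges * q + biases - t)
--         d1 = abs(edges * (q + 1) + biases - t)
--         k = q if d0 <= d1 else q + 1
--         if k < lo:
--             k = lo
--         if k > hi:
--             k = hi
--     return k, edges * k + biases
-- ===== Notes on version B (the rewrite author's own statement) =====
-- stated objective: faster
-- what changed: B replaces A's scan over every knot count (recomputing the full layer-sum parameter formula for each k) by computing the linear coefficients p(k)=edges*k+biases once and selecting the admissible k closest to the target in closed form with floor division, with the loop's smaller-k tie-breaking.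
import Mathlib
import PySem

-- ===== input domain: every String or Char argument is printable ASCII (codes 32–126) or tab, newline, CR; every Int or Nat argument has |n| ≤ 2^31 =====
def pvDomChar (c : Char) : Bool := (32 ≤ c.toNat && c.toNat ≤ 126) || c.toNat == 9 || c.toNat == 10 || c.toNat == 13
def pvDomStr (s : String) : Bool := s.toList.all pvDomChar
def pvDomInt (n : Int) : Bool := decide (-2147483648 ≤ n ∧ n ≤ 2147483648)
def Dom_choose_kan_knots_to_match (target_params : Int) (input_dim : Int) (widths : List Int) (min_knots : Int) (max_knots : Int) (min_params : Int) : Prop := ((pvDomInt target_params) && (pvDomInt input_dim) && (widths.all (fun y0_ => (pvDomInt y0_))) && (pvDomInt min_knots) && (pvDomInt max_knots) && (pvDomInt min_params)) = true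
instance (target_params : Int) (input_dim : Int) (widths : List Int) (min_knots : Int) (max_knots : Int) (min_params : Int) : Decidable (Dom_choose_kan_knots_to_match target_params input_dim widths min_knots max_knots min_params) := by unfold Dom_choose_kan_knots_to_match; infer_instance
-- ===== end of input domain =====

-- B replaces A's per-k rescan of the layer sums by computing the linear coefficients of
-- p(k) = edges*k + biases once and choosing the admissible k closest to the target in
-- closed form (objective: faster). On inputs where the Python raises ValueError both
-- ports return (0, 0); those inputs are excluded by Pre_.

-- ===== PORT A =====
def kan_param_count (input_dim : Int) (widths : List Int) (num_knots : Int) : Int :=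
  let dims := [input_dim] ++ widths ++ [1]
  let edges := ((List.range (dims.length - 1)).map (fun i => dims.getD i 0 * dims.getD (i + 1) 0)).sum
  let biases := ((List.range (dims.length - 1)).map (fun i => dims.getD (i + 1) 0)).sum
  edges * num_knots + biases

def choose_kan_knots_to_match (target_params : Int) (input_dim : Int) (widths : List Int) (min_knots : Int) (max_knots : Int) (min_params : Int) : Int × Int :=
  let st := (PySem.List.pyRange min_knots (max_knots + 1) 1).foldl
    (fun (acc : Option (Int × Int × Int)) k =>
      let p := kan_param_count input_dim widths k
      if p < min_params then acc
      else
        let diff := |p - target_params|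
        match acc with
        | none => some (k, p, diff)
        | some (bk, bp, bd) => if diff < bd then some (k, p, diff) else some (bk, bp, bd))
    none
  match st with
  | some (bk, bp, _) => (bk, bp)
  | none => (0, 0)  -- Python raises ValueError here; excluded by Pre_

-- ===== PORT B =====
def choose_kan_knots_to_match_alt (target_params : Int) (input_dim : Int) (widths : List Int) (min_knots : Int) (max_knots : Int) (min_params : Int) : Int × Int :=
  let dims := [input_dim] ++ widths ++ [1]
  let edges := ((dims.zip dims.tail).map (fun xy => xy.1 * xy.2)).sum
  let biases := dims.tail.sum
  let lo := if 0 < edges then max min_knots (-(PySem.Int.floordiv (biases - min_params) edges))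
            else if edges < 0 then min_knots
            else if biases < min_params then max_knots + 1
            else min_knots
  let hi := if edges < 0 then min max_knots (PySem.Int.floordiv (min_params - biases) edges) else max_knots
  if lo > hi then (0, 0)  -- Python raises ValueError here; excluded by Pre_
  else if edges = 0 then (lo, edges * lo + biases)
  else
    let q := PySem.Int.floordiv (target_params - biases) edges
    let d0 := |edges * q + biases - target_params|
    let d1 := |edges * (q + 1) + biases - target_params|
    let k0 := if d0 ≤ d1 then q else q + 1
    let k1 := if k0 < lo then lo else k0
    let k := if k1 > hi then hi else k1
    (k, edges * k + biases)

-- ===== PRECONDITION & SPEC =====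
-- coefficients of the (linear in k) parameter count, used only to state Pre_
def pvEdges (input_dim : Int) (widths : List Int) : Int :=
  let dims := [input_dim] ++ widths ++ [1]
  ((dims.zip dims.tail).map (fun xy => xy.1 * xy.2)).sum
def pvBiases (widths : List Int) : Int := widths.sum + 1

-- Pre_ excludes exactly the inputs on which A raises ValueError: those where no knot count
-- k in [min_knots, max_knots] yields at least min_params parameters (the parameter count is
-- linear in k, so its maximum over the interval is attained at an endpoint).
def Pre_choose_kan_knots_to_match (target_params : Int) (input_dim : Int) (widths : List Int) (min_knots : Int) (max_knots : Int) (min_params : Int) : Prop :=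
  min_knots ≤ max_knots ∧
    (min_params ≤ pvEdges input_dim widths * min_knots + pvBiases widths ∨
     min_params ≤ pvEdges input_dim widths * max_knots + pvBiases widths)
instance (target_params : Int) (input_dim : Int) (widths : List Int) (min_knots : Int) (max_knots : Int) (min_params : Int) : Decidable (Pre_choose_kan_knots_to_match target_params input_dim widths min_knots max_knots min_params) := by unfold Pre_choose_kan_knots_to_match; infer_instance

def pvWitness_choose_kan_knots_to_match : Int × Int × List Int × Int × Int × Int := (2000, 2, [8, 8], 4, 64, 1000)

def Spec_choose_kan_knots_to_match (target_params : Int) (input_dim : Int) (widths : List Int) (min_knots : Int) (max_knots : Int) (min_params : Int) (out : Int × Int) : Prop := out = choose_kan_knots_to_match_alt target_params input_dim widths min_knots max_knots min_params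
instance (target_params : Int) (input_dim : Int) (widths : List Int) (min_knots : Int) (max_knots : Int) (min_params : Int) (out : Int × Int) : Decidable (Spec_choose_kan_knots_to_match target_params input_dim widths min_knots max_knots min_params out) := by unfold Spec_choose_kan_knots_to_match; infer_instance

-- ===== CLAIM (what is proved, stated in full; the proofs are below) =====
def Claim_equal_choose_kan_knots_to_match : Prop := ∀ (target_params : Int) (input_dim : Int) (widths : List Int) (min_knots : Int) (max_knots : Int) (min_params : Int), Dom_choose_kan_knots_to_match target_params input_dim widths min_knots max_knots min_params → Pre_choose_kan_knots_to_match target_params input_dim widths min_knots max_knots min_params → Spec_choose_kan_knots_to_match target_params input_dim widths min_knots max_knots min_params (choose_kan_knots_to_match target_params input_dim widths min_knots max_knots min_params)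

-- ===== LEMMAS AND PROOFS =====

-- adjacent-pair sums: A's index form equals B's zip form
theorem pvAdjMap (f : Int → Int → Int) : ∀ (l : List Int),
    (List.range (l.length - 1)).map (fun i => f (l.getD i 0) (l.getD (i + 1) 0))
      = (l.zip l.tail).map (fun xy => f xy.1 xy.2)
  | [] => by simp
  | [a] => by simp
  | a :: b :: l => by
      have IH := pvAdjMap f (b :: l)
      simp only [List.length_cons, Nat.add_sub_cancel] at IH ⊢
      rw [List.range_succ_eq_map]
      simp only [List.map_cons, List.map_map, Function.comp_def, List.getD_cons_succ,
        List.getD_cons_zero, List.tail_cons, List.zip_cons_cons]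
      exact congrArg _ IH

theorem pvZipSnd : ∀ (x : Int) (s : List Int),
    ((x :: s).zip s).map (fun xy : Int × Int => xy.2) = s := by
  intro x s
  induction s generalizing x with
  | nil => simp
  | cons y ys ih => simpa using ih y

theorem kan_param_count_eq (d : Int) (w : List Int) (k : Int) :
    kan_param_count d w k = pvEdges d w * k + pvBiases w := by
  simp only [kan_param_count, pvEdges, pvBiases]
  rw [pvAdjMap (fun x y => x * y), pvAdjMap (fun _ y => y)]
  have hcons : [d] ++ w ++ [1] = d :: (w ++ [1]) := by simp
  rw [hcons]
  simp only [List.tail_cons, pvZipSnd]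
  simp [List.sum_append]

-- the loop body of A, with the param count replaced by its linear form
def pvStep (t P e b : Int) (acc : Option (Int × Int × Int)) (k : Int) : Option (Int × Int × Int) :=
  if e * k + b < P then acc
  else
    match acc with
    | none => some (k, e * k + b, |e * k + b - t|)
    | some (bk, bp, bd) => if |e * k + b - t| < bd then some (k, e * k + b, |e * k + b - t|) else some (bk, bp, bd)

def pvDiff (e b t k : Int) : Int := |e * k + b - t|

-- iterative "first minimum" the loop computes once a best exists
def pvFirstMin (t P e b : Int) (k0 a : Int) : Nat → Int
  | 0 => k0
  | Nat.succ n => pvFirstMin t P e b (if P ≤ e * a + b ∧ pvDiff e b t a < pvDiff e b t k0 then a else k0) (a + 1) n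

theorem pvStep_some (t P e b k0 a : Int) :
    pvStep t P e b (some (k0, e * k0 + b, pvDiff e b t k0)) a
      = (let k1 := if P ≤ e * a + b ∧ pvDiff e b t a < pvDiff e b t k0 then a else k0
         some (k1, e * k1 + b, pvDiff e b t k1)) := by
  simp only [pvStep, pvDiff]
  split_ifs with h1 h2 h3 h3 <;> simp_all <;> omega

theorem pvFold_some (t P e b : Int) : ∀ (n : Nat) (a k0 : Int),
    (PySem.List.pyRange a (a + n) 1).foldl (pvStep t P e b) (some (k0, e * k0 + b, pvDiff e b t k0))
      = (let K := pvFirstMin t P e b k0 a n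
         some (K, e * K + b, pvDiff e b t K)) := by
  intro n
  induction n with
  | zero => intro a k0; rw [PySem.List.pyRange_one_eq_nil (by omega)]; rfl
  | succ n ih =>
    intro a k0
    rw [PySem.List.pyRange_one_cons (by push_cast; omega)]
    simp only [List.foldl_cons, pvStep_some]
    have harg : (a : Int) + ((n + 1 : Nat) : Int) = (a + 1) + (n : Int) := by push_cast; ring
    rw [harg, ih (a + 1)]
    rfl

theorem pvFold_none_first (t P e b : Int) : ∀ (n : Nat) (a f : Int),
    a ≤ f → f < a + n → P ≤ e * f + b → (∀ k, a ≤ k → k < f → e * k + b < P) →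
    (PySem.List.pyRange a (a + n) 1).foldl (pvStep t P e b) none
      = (let K := pvFirstMin t P e b f (f + 1) ((a + n - (f + 1)).toNat)
         some (K, e * K + b, pvDiff e b t K)) := by
  intro n
  induction n with
  | zero => intro a f h1 h2 _ _; push_cast at h2; omega
  | succ n ih =>
    intro a f h1 h2 h3 h4
    rw [PySem.List.pyRange_one_cons (by push_cast; omega)]
    simp only [List.foldl_cons]
    by_cases hf : a = f
    · subst hf
      have hstep : pvStep t P e b none a = some (a, e * a + b, pvDiff e b t a) := by
        simp only [pvStep, pvDiff]
        rw [if_neg (by omega)]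
      rw [hstep]
      have harg : (a : Int) + ((n + 1 : Nat) : Int) = (a + 1) + (n : Int) := by push_cast; ring
      rw [harg, pvFold_some t P e b n (a + 1) a]
      have hn : ((a : Int) + ((n + 1 : Nat) : Int) - (a + 1)).toNat = n := by push_cast; omega
      rw [← harg] at *
      simp only [hn]
    · have hstep : pvStep t P e b none a = none := by
        have := h4 a le_rfl (by omega)
        simp only [pvStep]
        rw [if_pos this]
      rw [hstep]
      have harg : (a : Int) + ((n + 1 : Nat) : Int) = (a + 1) + (n : Int) := by push_cast; ring
      rw [harg, ih (a + 1) f (by omega) (by push_cast at h2 ⊢; omega) h3 (fun k hk1 hk2 => h4 k (by omega) hk2)]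

-- characterization: pvFirstMin returns ks when ks is the first overall minimum
theorem pvFirstMin_eq (t P e b : Int) : ∀ (n : Nat) (a k0 ks : Int),
    ((ks = k0 ∧ ∀ k, a ≤ k → k < a + n → P ≤ e * k + b → pvDiff e b t k0 ≤ pvDiff e b t k)
     ∨ (P ≤ e * ks + b ∧ a ≤ ks ∧ ks < a + n ∧ pvDiff e b t ks < pvDiff e b t k0
        ∧ (∀ k, a ≤ k → k < a + n → P ≤ e * k + b → pvDiff e b t ks ≤ pvDiff e b t k)
        ∧ (∀ k, a ≤ k → k < ks → P ≤ e * k + b → pvDiff e b t ks < pvDiff e b t k))) →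
    pvFirstMin t P e b k0 a n = ks := by
  intro n
  induction n with
  | zero =>
    intro a k0 ks h
    rcases h with ⟨h1, _⟩ | ⟨_, h2, h3, _⟩
    · simp [pvFirstMin, h1]
    · exact absurd h3 (by omega)
  | succ n ih =>
    intro a k0 ks h
    simp only [pvFirstMin]
    rcases h with ⟨h1, h2⟩ | ⟨hv, hlo, hhi, hlt, hmin, hfirst⟩
    · subst h1
      rw [if_neg (by
        rintro ⟨hva, hda⟩
        exact absurd (h2 a le_rfl (by push_cast; omega) hva) (by omega))]
      exact ih (a + 1) ks ks (Or.inl ⟨rfl, fun k hk1 hk2 hk3 => h2 k (by omega) (by push_cast at hk2 ⊢; omega) hk3⟩)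
    · by_cases hksa : ks = a
      · subst hksa
        rw [if_pos ⟨hv, hlt⟩]
        exact ih (ks + 1) ks ks (Or.inl ⟨rfl, fun k hk1 hk2 hk3 => hmin k (by omega) (by push_cast at hk2 ⊢; omega) hk3⟩)
      · have hks_gt : a < ks := by omega
        by_cases hcond : P ≤ e * a + b ∧ pvDiff e b t a < pvDiff e b t k0
        · rw [if_pos hcond]
          refine ih (a + 1) a ks (Or.inr ⟨hv, by omega, by push_cast at hhi ⊢; omega,
            hfirst a le_rfl hks_gt hcond.1, ?_, ?_⟩)
          · exact fun k hk1 hk2 hk3 => hmin k (by omega) (by push_cast at hk2 ⊢; omega) hk3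
          · exact fun k hk1 hk2 hk3 => hfirst k (by omega) hk2 hk3
        · rw [if_neg hcond]
          refine ih (a + 1) k0 ks (Or.inr ⟨hv, by omega, by push_cast at hhi ⊢; omega, hlt, ?_, ?_⟩)
          · exact fun k hk1 hk2 hk3 => hmin k (by omega) (by push_cast at hk2 ⊢; omega) hk3
          · exact fun k hk1 hk2 hk3 => hfirst k (by omega) hk2 hk3

-- the closed-form candidate (clamped into [lo,hi]) is the first minimum of a V-shaped diff
theorem pvSelect_min (E R q lo hi cand k1 ks : Int) (diff : Int → Int)
    (hE : 1 ≤ E) (h0 : 0 ≤ R) (h1 : R < E) (hlh : lo ≤ hi)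
    (hL : ∀ k, k ≤ q → diff k = E * (q - k) + R)
    (hG : ∀ k, q + 1 ≤ k → diff k = E * (k - q - 1) + (E - R))
    (hcand : cand = if R ≤ E - R then q else q + 1)
    (hk1 : k1 = if cand < lo then lo else cand)
    (hks : ks = if k1 > hi then hi else k1) :
    lo ≤ ks ∧ ks ≤ hi ∧ (∀ k, lo ≤ k → k ≤ hi → diff ks ≤ diff k)
      ∧ (∀ k, lo ≤ k → k < ks → diff ks < diff k) := by
  have hmul_nonneg : ∀ x : Int, 0 ≤ x → 0 ≤ E * x := fun x hx => mul_nonneg (by omega) hx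
  have hmul_pos : ∀ x : Int, 0 < x → 0 < E * x := fun x hx => mul_pos (by omega) hx
  have hmul_mono : ∀ x y : Int, x ≤ y → E * x ≤ E * y :=
    fun x y h => mul_le_mul_of_nonneg_left h (by omega)
  have hmul_smono : ∀ x y : Int, x < y → E * x < E * y :=
    fun x y h => mul_lt_mul_of_pos_left h (by omega)
  have hdq : diff q = R := by rw [hL q le_rfl]; ring_nf
  have hdq1 : diff (q + 1) = E - R := by rw [hG (q + 1) le_rfl]; ring_nf
  have hcq : q ≤ cand ∧ cand ≤ q + 1 := by rw [hcand]; split_ifs <;> omega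
  have hmin : ∀ k, diff cand ≤ diff k := by
    intro k
    by_cases hk : k ≤ q <;> by_cases hc : R ≤ E - R
    · rw [hcand, if_pos hc, hdq, hL k hk]
      have := hmul_nonneg (q - k) (by omega); linarith
    · rw [hcand, if_neg hc, hdq1, hL k hk]
      have := hmul_nonneg (q - k) (by omega); linarith
    · rw [hcand, if_pos hc, hdq, hG k (by omega)]
      have := hmul_nonneg (k - q - 1) (by omega); linarith
    · rw [hcand, if_neg hc, hdq1, hG k (by omega)]
      have := hmul_nonneg (k - q - 1) (by omega); linarith
  have hstrict : ∀ k, k < cand → diff cand < diff k := by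
    intro k hk
    have hkq : k ≤ q := by omega
    by_cases hc : R ≤ E - R
    · rw [hcand, if_pos hc] at hk ⊢
      rw [hdq, hL k hkq]
      have := hmul_pos (q - k) (by omega); linarith
    · rw [hcand, if_neg hc] at hk ⊢
      rw [hdq1, hL k hkq]
      have := hmul_nonneg (q - k) (by omega); linarith
  by_cases hclo : cand < lo
  · -- clamped up to lo; everything in [lo,hi] lies on the increasing side
    rw [if_pos hclo] at hk1
    rw [hk1, if_neg (by omega)] at hks
    have hqlo : q + 1 ≤ lo := by omega
    refine ⟨by omega, by omega, ?_, ?_⟩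
    · intro k hk _
      rw [hks, hG lo hqlo, hG k (by omega)]
      have := hmul_mono (lo - q - 1) (k - q - 1) (by omega); linarith
    · intro k hk1' hk2'
      omega
  · rw [if_neg hclo] at hk1
    by_cases hchi : cand > hi
    · -- clamped down to hi; everything in [lo,hi] lies on the decreasing side
      rw [hk1, if_pos hchi] at hks
      have hhiq : hi ≤ q := by omega
      refine ⟨by omega, by omega, ?_, ?_⟩
      · intro k _ hk
        rw [hks, hL hi hhiq, hL k (by omega)]
        have := hmul_mono (q - hi) (q - k) (by omega); linarith
      · intro k _ hk
        rw [hks] at hk ⊢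
        rw [hL hi hhiq, hL k (by omega)]
        have := hmul_smono (q - hi) (q - k) (by omega); linarith
    · rw [hk1, if_neg hchi] at hks
      exact ⟨by omega, by omega, fun k _ _ => hks ▸ hmin k, fun k _ hk => hks ▸ hstrict k (hks ▸ hk)⟩

-- validity window: for e > 0 the admissible k are exactly those ≥ -⌊(b-P)/e⌋
theorem pvValid_pos (e b P k F ρ : Int) (he : 0 < e) (hfr : F * e + ρ = b - P)
    (hρ0 : 0 ≤ ρ) (hρ1 : ρ < e) : (P ≤ e * k + b) ↔ -F ≤ k := by
  constructor
  · intro h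
    by_contra hc
    push_neg at hc
    have hk : k + F ≤ -1 := by omega
    nlinarith [mul_le_mul_of_nonneg_left hk he.le]
  · intro h
    have hk : 0 ≤ k + F := by omega
    nlinarith [mul_nonneg he.le hk]

-- validity window: for e < 0 the admissible k are exactly those ≤ ⌊(P-b)/e⌋
theorem pvValid_neg (e b P k H ρ : Int) (he : e < 0) (hfr : H * e + ρ = P - b)
    (hρ0 : ρ ≤ 0) (hρ1 : e < ρ) : (P ≤ e * k + b) ↔ k ≤ H := by
  constructor
  · intro h
    by_contra hc
    push_neg at hc
    have hk : H + 1 ≤ k := by omega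
    nlinarith [mul_le_mul_of_nonpos_left hk he.le]
  · intro h
    nlinarith [mul_le_mul_of_nonpos_left h he.le]

-- bounds of Python mod for a negative divisor
theorem pvMod_neg_bounds (x e : Int) (he : e < 0) :
    PySem.Int.mod x e ≤ 0 ∧ e < PySem.Int.mod x e := by
  have h1 : PySem.Int.mod (-x) (-e) = -PySem.Int.mod x e := PySem.Int.mod_neg_neg x e
  rw [PySem.Int.mod_eq_emod_of_pos (by omega)] at h1
  have h2 := Int.emod_nonneg (-x) (show -e ≠ 0 by omega)
  have h3 := Int.emod_lt_of_pos (-x) (show 0 < -e by omega)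
  omega

-- A's loop over [m, M] returns exactly the clamped closed-form candidate
theorem pvMain_core (t P e b m M LO HI E R q cand k1 ks : Int)
    (hmM : m ≤ M) (hmLO : m ≤ LO) (hLOHI : LO ≤ HI) (hHIM : HI ≤ M)
    (hvalid : ∀ k, m ≤ k → k ≤ M → ((P ≤ e * k + b) ↔ (LO ≤ k ∧ k ≤ HI)))
    (hE : 1 ≤ E) (h0 : 0 ≤ R) (h1 : R < E)
    (hL : ∀ k, k ≤ q → pvDiff e b t k = E * (q - k) + R)
    (hG : ∀ k, q + 1 ≤ k → pvDiff e b t k = E * (k - q - 1) + (E - R))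
    (hcand : cand = if R ≤ E - R then q else q + 1)
    (hk1 : k1 = if cand < LO then LO else cand)
    (hks : ks = if k1 > HI then HI else k1) :
    (PySem.List.pyRange m (M + 1) 1).foldl (pvStep t P e b) none
      = some (ks, e * ks + b, pvDiff e b t ks) := by
  obtain ⟨hks_lo, hks_hi, hmin, hfirst⟩ :=
    pvSelect_min E R q LO HI cand k1 ks (pvDiff e b t) hE h0 h1 hLOHI hL hG hcand hk1 hks
  have hn : (M + 1 : Int) = m + (((M + 1 - m).toNat : Int)) := by omega
  rw [hn, pvFold_none_first t P e b (M + 1 - m).toNat m LO hmLO (by omega)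
        ((hvalid LO hmLO (by omega)).mpr ⟨le_rfl, hLOHI⟩)
        (fun k hk1' hk2' => by
          by_contra hcon
          have := (hvalid k hk1' (by omega)).mp (by omega)
          omega)]
  have hn2 : ((m + (((M + 1 - m).toNat : Int)) - (LO + 1)).toNat : Int) = M - LO := by omega
  have hKeq : pvFirstMin t P e b LO (LO + 1) ((m + (((M + 1 - m).toNat : Int)) - (LO + 1)).toNat) = ks := by
    apply pvFirstMin_eq
    by_cases h : ks = LO
    · subst h
      left
      refine ⟨rfl, fun k hk1' hk2' hk3' => ?_⟩
      have hwin := (hvalid k (by omega) (by omega)).mp hk3'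
      exact hmin k hwin.1 hwin.2
    · right
      have hvks : P ≤ e * ks + b := (hvalid ks (by omega) (by omega)).mpr ⟨hks_lo, hks_hi⟩
      refine ⟨hvks, by omega, by omega, hfirst LO le_rfl (by omega), ?_, ?_⟩
      · intro k hk1' hk2' hk3'
        have hwin := (hvalid k (by omega) (by omega)).mp hk3'
        exact hmin k hwin.1 hwin.2
      · intro k hk1' hk2' _
        exact hfirst k (by omega) hk2'
  simp only [hKeq]

-- ===== VERDICT (by name: the statement is the Claim_ definition above) =====
theorem choose_kan_knots_to_match_spec : Claim_equal_choose_kan_knots_to_match := by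
  intro t d w m M P _hdom hpre
  unfold Pre_choose_kan_knots_to_match at hpre
  obtain ⟨hmM, hval⟩ := hpre
  unfold Spec_choose_kan_knots_to_match
  set e := pvEdges d w with he_def
  set b := pvBiases w with hb_def
  -- A as a fold of pvStep
  have hA : choose_kan_knots_to_match t d w m M P
      = (match (PySem.List.pyRange m (M + 1) 1).foldl (pvStep t P e b) none with
         | some (bk, bp, _) => (bk, bp)
         | none => (0, 0)) := by
    simp only [choose_kan_knots_to_match]
    have hfun := List.foldl_ext
      (fun (acc : Option (Int × Int × Int)) k =>
        let p := kan_param_count d w k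
        if p < P then acc
        else
          let diff := |p - t|
          match acc with
          | none => some (k, p, diff)
          | some (bk, bp, bd) => if diff < bd then some (k, p, diff) else some (bk, bp, bd))
      (pvStep t P e b) none (l := PySem.List.pyRange m (M + 1) 1)
      (fun acc k _ => by
        simp only [kan_param_count_eq, pvStep, ← he_def, ← hb_def])
    rw [hfun]
  have hBedge : ((([d] ++ w ++ [1]).zip ([d] ++ w ++ [1]).tail).map
      (fun xy : Int × Int => xy.1 * xy.2)).sum = e := by rw [he_def]; rfl
  have hBbias : ([d] ++ w ++ [1]).tail.sum = b := by
    rw [hb_def]; simp [pvBiases]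
  rcases lt_trichotomy e 0 with hneg | hzero | hpos
  · -- e < 0 : decreasing parameter count; admissible window is [m, min M H]
    set H := PySem.Int.floordiv (P - b) e with hH_def
    have hfr := PySem.Int.floordiv_mul_add_mod (P - b) e
    rw [← hH_def] at hfr
    obtain ⟨hρ1, hρ2⟩ := pvMod_neg_bounds (P - b) e hneg
    have hviff : ∀ k, (P ≤ e * k + b) ↔ k ≤ H :=
      fun k => pvValid_neg e b P k H (PySem.Int.mod (P - b) e) hneg hfr hρ1 hρ2
    have hmH : m ≤ H := by
      rcases hval with h | h
      · exact (hviff m).mp h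
      · have := (hviff M).mp h; omega
    set q := PySem.Int.floordiv (t - b) e with hq_def
    set r := PySem.Int.mod (t - b) e with hr_def
    have hqr : q * e + r = t - b := by
      rw [hq_def, hr_def]; exact PySem.Int.floordiv_mul_add_mod (t - b) e
    obtain ⟨hr1, hr2⟩ := pvMod_neg_bounds (t - b) e hneg
    rw [← hr_def] at hr1 hr2
    have hL : ∀ k, k ≤ q → pvDiff e b t k = (-e) * (q - k) + -r := by
      intro k hk
      have hx : e * k + b - t = (-e) * (q - k) + -r := by linear_combination hqr
      rw [pvDiff, hx]
      exact abs_of_nonneg (by nlinarith [mul_nonneg (show (0:Int) ≤ -e by omega) (show (0:Int) ≤ q - k by omega)])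
    have hG : ∀ k, q + 1 ≤ k → pvDiff e b t k = (-e) * (k - q - 1) + (-e - -r) := by
      intro k hk
      have hx : e * k + b - t = -((-e) * (k - q - 1) + (-e - -r)) := by linear_combination hqr
      rw [pvDiff, hx, abs_neg]
      exact abs_of_nonneg (by nlinarith [mul_nonneg (show (0:Int) ≤ -e by omega) (show (0:Int) ≤ k - q - 1 by omega)])
    have hd0 : |e * q + b - t| = -r := by
      have h := hL q le_rfl; rw [pvDiff] at h; rw [h]; ring
    have hd1 : |e * (q + 1) + b - t| = -e - -r := by
      have h := hG (q + 1) le_rfl; rw [pvDiff] at h; rw [h]; ring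
    -- reduce B to the clamped candidate
    simp only [choose_kan_knots_to_match_alt]
    rw [hBedge, hBbias, if_neg (show ¬(0 < e) by omega), if_pos hneg, if_pos hneg,
      ← hH_def, if_neg (show ¬(m > min M H) by omega), if_neg (show ¬(e = 0) by omega),
      ← hq_def, hd0, hd1]
    set cand := if -r ≤ -e - -r then q else q + 1 with hcand_def
    set k1 := if cand < m then m else cand with hk1_def
    set ks := if k1 > min M H then min M H else k1 with hks_def
    rw [hA, pvMain_core t P e b m M m (min M H) (-e) (-r) q cand k1 ks hmM le_rfl
      (by omega) (by omega)
      (fun k hk1' hk2' => by rw [hviff k]; omega)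
      (by omega) (by omega) (by omega) hL hG hcand_def hk1_def hks_def]
  · -- e = 0 : constant parameter count; the loop keeps its very first knot count
    have hPb : P ≤ b := by
      rcases hval with h | h <;> [skip; skip] <;> rw [hzero] at h <;> simpa using h
    have hvm : P ≤ e * m + b := by rw [hzero]; simpa using hPb
    have hn : (M + 1 : Int) = m + (((M + 1 - m).toNat : Int)) := by omega
    rw [hA, hn, pvFold_none_first t P e b (M + 1 - m).toNat m m le_rfl (by omega) hvm
      (fun k hk1' hk2' => absurd hk2' (by omega))]
    have hK : pvFirstMin t P e b m (m + 1) ((m + (((M + 1 - m).toNat : Int)) - (m + 1)).toNat) = m := by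
      apply pvFirstMin_eq
      left
      refine ⟨rfl, fun k _ _ _ => ?_⟩
      simp [pvDiff, hzero]
    simp only [hK]
    simp only [choose_kan_knots_to_match_alt]
    rw [hBedge, hBbias, if_neg (show ¬(0 < e) by omega), if_neg (show ¬(e < 0) by omega),
      if_neg (show ¬(b < P) by omega), if_neg (show ¬(e < 0) by omega),
      if_neg (show ¬(m > M) by omega), if_pos hzero]
  · -- e > 0 : increasing parameter count; admissible window is [max m (-F), M]
    set F := PySem.Int.floordiv (b - P) e with hF_def
    have hfr := PySem.Int.floordiv_mul_add_mod (b - P) e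
    rw [← hF_def] at hfr
    have hρ1 := Int.emod_nonneg (b - P) (show e ≠ 0 by omega)
    have hρ2 := Int.emod_lt_of_pos (b - P) hpos
    have hmodF : PySem.Int.mod (b - P) e = (b - P) % e := PySem.Int.mod_eq_emod_of_pos hpos
    rw [hmodF] at hfr
    have hviff : ∀ k, (P ≤ e * k + b) ↔ -F ≤ k :=
      fun k => pvValid_pos e b P k F ((b - P) % e) hpos hfr hρ1 hρ2
    have hFM : -F ≤ M := by
      rcases hval with h | h
      · have := (hviff m).mp h; omega
      · exact (hviff M).mp h
    set q := PySem.Int.floordiv (t - b) e with hq_def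
    set r := PySem.Int.mod (t - b) e with hr_def
    have hqr : q * e + r = t - b := by
      rw [hq_def, hr_def]; exact PySem.Int.floordiv_mul_add_mod (t - b) e
    have hmodr : r = (t - b) % e := by rw [hr_def]; exact PySem.Int.mod_eq_emod_of_pos hpos
    have hr1 : 0 ≤ r := by rw [hmodr]; exact Int.emod_nonneg (t - b) (by omega)
    have hr2 : r < e := by rw [hmodr]; exact Int.emod_lt_of_pos (t - b) hpos
    have hL : ∀ k, k ≤ q → pvDiff e b t k = e * (q - k) + r := by
      intro k hk
      have hx : e * k + b - t = -(e * (q - k) + r) := by linear_combination hqr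
      rw [pvDiff, hx, abs_neg]
      exact abs_of_nonneg (by nlinarith [mul_nonneg hpos.le (show (0:Int) ≤ q - k by omega)])
    have hG : ∀ k, q + 1 ≤ k → pvDiff e b t k = e * (k - q - 1) + (e - r) := by
      intro k hk
      have hx : e * k + b - t = e * (k - q - 1) + (e - r) := by linear_combination hqr
      rw [pvDiff, hx]
      exact abs_of_nonneg (by nlinarith [mul_nonneg hpos.le (show (0:Int) ≤ k - q - 1 by omega)])
    have hd0 : |e * q + b - t| = r := by
      have h := hL q le_rfl; rw [pvDiff] at h; rw [h]; ring
    have hd1 : |e * (q + 1) + b - t| = e - r := by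
      have h := hG (q + 1) le_rfl; rw [pvDiff] at h; rw [h]; ring
    simp only [choose_kan_knots_to_match_alt]
    rw [hBedge, hBbias, if_pos hpos, if_neg (show ¬(e < 0) by omega), ← hF_def,
      if_neg (show ¬(max m (-F) > M) by omega), if_neg (show ¬(e = 0) by omega),
      ← hq_def, hd0, hd1]
    set cand := if r ≤ e - r then q else q + 1 with hcand_def
    set k1 := if cand < max m (-F) then max m (-F) else cand with hk1_def
    set ks := if k1 > M then M else k1 with hks_def
    rw [hA, pvMain_core t P e b m M (max m (-F)) M e r q cand k1 ks hmM
      (by omega) (by omega) le_rfl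
      (fun k hk1' hk2' => by rw [hviff k]; omega)
      (by omega) hr1 hr2 hL hG hcand_def hk1_def hks_def]
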